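-- pv_equiv track=rewrite | github.com/ekeilty17/Project_Euler | p095.py | brute_force_more_efficient
-- ===== SOURCE A (Python) =====
-- def get_all_factors_to_limit(N):
--     factors = [[1, n] for n in range(N+1)]
--     factors[0] = []
--     factors[1] = [1]
--     for n in range(2, N+1):
--         for k in range(2, N//n+1):
--             factors[k*n].append(n)
--     return factors
--
-- def brute_force_more_efficient(N):
--
--     # we pre-process all the factor sums
--     # TODO: This is still the slowest part, but I don't see how you make it any faster
--     factors = get_all_factors_to_limit(N)
--     factor_sum = [sum(factors[n]) - n for n in range(N+1)]
--     factor_sum[0] = 0               # include these to help indexing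
--     factor_sum[1] = 1
--
--     # then, we just need to search for the longest chain
--     chains = [[] for n in range(N+1)]
--     chains[0] = [0]                 # include these to help indexing
--     chains[1] = [1]
--
--     # computing chains
--     # This is now quite quick
--     for n in range(2, N+1):
--         curr, nxt = n, factor_sum[n]
--         while curr not in chains[n]:
--             chains[n].append(curr)
--
--             # reach limit
--             if nxt > N:
--                 chains[n] = []
--                 break
--
--             # if we already calculated nxt, then we can use the previous computation
--             if chains[nxt] != []:
--                 i = len(chains[nxt])
--                 if n in chains[nxt]:
--                     i = chains[nxt].index(n)
--                 elif curr in chains[nxt]: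
--                     i = chains[nxt].index(curr)
--                 chains[n].extend( chains[nxt][:i] )
--                 break
--             curr, nxt = nxt, factor_sum[nxt]
--
--     # finding amicable chains
--     # same as previous
--     amicable_chains = []
--     for n in range(2, N+1):
--         if len(chains[n]) == 0:
--             continue
--         if factor_sum[ chains[n][-1] ] == n:
--             amicable_chains.append( chains[n] )
--
--     longest_chain = max(amicable_chains, key=len)
--     return longest_chain
-- ===== SOURCE B (Python) =====
-- def brute_force_more_efficient(N):
--     # additive divisor-sum sieve: fs[m] = sum of proper divisors of m
--     fs = [0] * (N + 1) if N >= 0 else []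
--     for d in range(1, N + 1):
--         for m in range(2 * d, N + 1, d):
--             fs[m] += d
--     # walk the functional graph n -> fs[n]; an amicable chain through n is a cycle back to n
--     best = None
--     for n in range(2, N + 1):
--         path = []
--         v = n
--         while v <= N and v not in path:
--             path.append(v)
--             v = fs[v]
--         if v == n and (best is None or len(path) > len(best)):
--             best = path
--     if best is None:
--         raise ValueError("no amicable chain below the limit")
--     return best
-- ===== Notes on version B (the rewrite author's own statement) =====
-- stated objective: faster
-- what changed: Replaces the per-number factor-list construction and the memoized cross-referencing chains table (with its index/extend splicing) by an additive divisor-sum sieve plus an independent forward walk from each n that detects a cycle exactly when the walk returns to its start, tracking the first longest cycle on the fly.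
import Mathlib
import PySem

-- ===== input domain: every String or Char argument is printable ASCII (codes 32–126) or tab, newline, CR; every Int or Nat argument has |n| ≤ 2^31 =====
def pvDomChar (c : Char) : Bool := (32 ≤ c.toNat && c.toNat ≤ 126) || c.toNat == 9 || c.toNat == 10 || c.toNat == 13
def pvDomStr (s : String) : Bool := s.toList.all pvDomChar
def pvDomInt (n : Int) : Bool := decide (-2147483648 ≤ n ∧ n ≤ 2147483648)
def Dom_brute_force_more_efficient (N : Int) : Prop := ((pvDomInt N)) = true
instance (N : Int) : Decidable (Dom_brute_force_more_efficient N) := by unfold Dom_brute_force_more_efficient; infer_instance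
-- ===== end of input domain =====

-- B replaces A's factor-list construction and memoized chains table by an additive
-- divisor-sum sieve plus an independent forward walk per start value (measured faster
-- by a constant factor at large N).


-- Python-list tables are ported as Lean Arrays (same values, O(1) update);
-- pvAget/pvAset are exact for the in-range nonnegative indices the programs use
-- (out of range they default/no-op; Pre_ keeps the programs in range).
def pvAget {A : Type} (T : Array A) (i : Int) (d : A) : A :=
  if h : 0 ≤ i ∧ i < (T.size : Int) then T[i.toNat]'(by omega) else d

def pvAset {A : Type} (T : Array A) (i : Int) (v : A) : Array A :=
  if h : 0 ≤ i ∧ i < (T.size : Int) then T.set i.toNat v (by omega) else T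

-- ===== PORT A =====
-- inner loop of get_all_factors_to_limit: for k in range(2, N//n+1): factors[k*n].append(n)
def pvAFactorsStep (N : Int) (factors : Array (List Int)) (n : Int) : Array (List Int) :=
  (PySem.List.pyRange 2 (PySem.Int.floordiv N n + 1) 1).foldl
    (fun fcs k => pvAset fcs (k*n) (pvAget fcs (k*n) [] ++ [n])) factors

-- the while loop computing chains[n]; fuel only makes the recursion structural
-- (with fuel N+2 the loop always exits by one of its breaks first)
def pvAWhile (N n : Int) (fsum : Array Int) (fuel : Nat)
    (chains : Array (List Int)) (curr nxt : Int) : Array (List Int) :=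
  match fuel with
  | 0 => chains
  | fuel+1 =>
    if curr ∈ pvAget chains n [] then chains
    else
      let chains1 := pvAset chains n (pvAget chains n [] ++ [curr])
      if N < nxt then pvAset chains1 n []
      else
        let q := pvAget chains1 nxt []
        if q = [] then
          pvAWhile N n fsum fuel chains1 nxt (pvAget fsum nxt 0)
        else
          let i : Nat := if n ∈ q then (PySem.List.index? q n).getD q.length
                         else if curr ∈ q then (PySem.List.index? q curr).getD q.length
                         else q.length
          pvAset chains1 n (pvAget chains1 n [] ++ q.take i)

-- indices used by A are provably in range for N ≥ 6 (Pre_); pyGetD/pySetD are exact there.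
-- max() over the empty amicable_chains list raises ValueError in Python: those inputs
-- (N ≤ 5) are excluded by Pre_.
-- get_all_factors_to_limit
def pvAFactors (N : Int) : Array (List Int) :=
  let factors0 := ((PySem.List.pyRange 0 (N+1) 1).map (fun n => [(1:Int), n])).toArray
  let factors1 := pvAset factors0 0 []
  let factors2 := pvAset factors1 1 [1]
  (PySem.List.pyRange 2 (N+1) 1).foldl (pvAFactorsStep N) factors2

-- factor_sum (with the two patches at 0 and 1)
def pvAFsum (N : Int) : Array Int :=
  let factors := pvAFactors N
  let fsum0 := ((PySem.List.pyRange 0 (N+1) 1).map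
      (fun n => (pvAget factors n []).sum - n)).toArray
  pvAset (pvAset fsum0 0 0) 1 1

-- the chains table after the processing loop
def pvAChains (N : Int) (fsum : Array Int) : Array (List Int) :=
  let chains0 := ((PySem.List.pyRange 0 (N+1) 1).map (fun _ => ([] : List Int))).toArray
  let chains1 := pvAset (pvAset chains0 0 [0]) 1 [1]
  (PySem.List.pyRange 2 (N+1) 1).foldl
      (fun ch n => pvAWhile N n fsum (N+2).toNat ch n (pvAget fsum n 0)) chains1

def brute_force_more_efficient (N : Int) : List Int :=
  let fsum := pvAFsum N
  let chains := pvAChains N fsum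
  let amicable := (PySem.List.pyRange 2 (N+1) 1).foldl
      (fun acc n =>
        if (pvAget chains n []).length = 0 then acc
        else if pvAget fsum (PySem.List.pyGetD (pvAget chains n []) (-1) 0) 0 = n
             then acc ++ [pvAget chains n []] else acc) []
  (PySem.List.max? amicable (fun c => c.length)).getD []

-- ===== PORT B =====
-- forward walk of Source B: while v <= N and v not in path: path.append(v); v = fs[v]
def pvBWalk (N : Int) (fs : Array Int) (fuel : Nat) (path : List Int) (v : Int) :
    List Int × Int :=
  match fuel with
  | 0 => (path, v)
  | fuel+1 =>
    if v ≤ N ∧ v ∉ path then pvBWalk N fs fuel (path ++ [v]) (pvAget fs v 0)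
    else (path, v)

-- Source B raises ValueError when no chain exists (N ≤ 5): excluded by Pre_.
-- the additive divisor-sum sieve of Source B
def pvBSieve (N : Int) : Array Int :=
  let fs0 : Array Int := if 0 ≤ N then (List.replicate (N+1).toNat (0:Int)).toArray else #[]
  (PySem.List.pyRange 1 (N+1) 1).foldl
    (fun l d => (PySem.List.pyRange (2*d) (N+1) d).foldl
       (fun l2 m => pvAset l2 m (pvAget l2 m 0 + d)) l) fs0

def brute_force_more_efficient_alt (N : Int) : List Int :=
  let fs := pvBSieve N
  let best := (PySem.List.pyRange 2 (N+1) 1).foldl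
    (fun best n =>
      let pr := pvBWalk N fs (N+2).toNat [] n
      match best with
      | none => if pr.2 = n then some pr.1 else none
      | some b => if pr.2 = n ∧ b.length < pr.1.length then some pr.1 else some b) none
  best.getD []

-- ===== PRECONDITION & SPEC =====
-- Pre_ excludes exactly the inputs where Python A raises: for N ≤ 5 there is no
-- amicable chain and max() over the empty list raises ValueError (for N ≤ 0 the
-- initialisation already raises IndexError); A returns normally iff N ≥ 6.
def Pre_brute_force_more_efficient (N : Int) : Prop := 6 ≤ N
instance (N : Int) : Decidable (Pre_brute_force_more_efficient N) := by
  unfold Pre_brute_force_more_efficient; infer_instance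

def pvWitness_brute_force_more_efficient : Int := 6

def Spec_brute_force_more_efficient (N : Int) (out : List Int) : Prop :=
  out = brute_force_more_efficient_alt N
instance (N : Int) (out : List Int) : Decidable (Spec_brute_force_more_efficient N out) := by
  unfold Spec_brute_force_more_efficient; infer_instance

-- ===== CLAIM (what is proved, stated in full; the proofs are below) =====
def Claim_equal_brute_force_more_efficient : Prop :=
  ∀ (N : Int), Dom_brute_force_more_efficient N → Pre_brute_force_more_efficient N →
    Spec_brute_force_more_efficient N (brute_force_more_efficient N)

-- ===== LEMMAS AND PROOFS =====

-- ---- generic walk machinery (spec level, shared by both sides) ----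

/-- The iterate segment n, f n, f² n, …, f^{k-1} n. -/
def pvSeg (f : Int → Int) (n : Int) (k : Nat) : List Int :=
  (List.range k).map (fun j => f^[j] n)

/-- Canonical forward walk (exactly Source B's loop, with an abstract successor). -/
def pvWlk (f : Int → Int) (N : Int) : Nat → List Int → Int → List Int × Int
  | 0, path, v => (path, v)
  | fuel+1, path, v =>
    if v ≤ N ∧ v ∉ path then pvWlk f N fuel (path ++ [v]) (f v) else (path, v)

def pvRes (f : Int → Int) (N n : Int) : List Int × Int := pvWlk f N (N+2).toNat [] n

def pvOnCyc (f : Int → Int) (N n : Int) : Prop := (pvRes f N n).2 = n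

/-- n returns to itself under f with all intermediate values in [0, N]. -/
def pvPeriodic (f : Int → Int) (N n : Int) : Prop :=
  ∃ j : Nat, 1 ≤ j ∧ f^[j] n = n ∧ ∀ i ≤ j, 0 ≤ f^[i] n ∧ f^[i] n ≤ N

/-- Invariant describing A's finished chains[n] entry. -/
def pvPhi (f : Int → Int) (N n : Int) (c : List Int) : Prop :=
  (pvOnCyc f N n → c = (pvRes f N n).1) ∧
  (c ≠ [] → c = pvSeg f n c.length ∧ (∀ x ∈ c, 0 ≤ x ∧ x ≤ N)
            ∧ f (f^[c.length - 1] n) ∈ c)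

theorem pvSeg_zero (f : Int → Int) (n : Int) : pvSeg f n 0 = [] := rfl

theorem pvSeg_succ (f : Int → Int) (n : Int) (k : Nat) :
    pvSeg f n (k+1) = pvSeg f n k ++ [f^[k] n] := by
  simp [pvSeg, List.range_succ]

theorem length_pvSeg (f : Int → Int) (n : Int) (k : Nat) : (pvSeg f n k).length = k := by
  simp [pvSeg]

theorem mem_pvSeg (f : Int → Int) (n x : Int) (k : Nat) :
    x ∈ pvSeg f n k ↔ ∃ j, j < k ∧ f^[j] n = x := by
  simp [pvSeg, eq_comm]

theorem pvSeg_getElem (f : Int → Int) (n : Int) (k j : Nat) (h : j < k) :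
    (pvSeg f n k)[j]'(by simpa [length_pvSeg] using h) = f^[j] n := by
  simp [pvSeg]

theorem pvSeg_take (f : Int → Int) (n : Int) (k i : Nat) (h : i ≤ k) :
    (pvSeg f n k).take i = pvSeg f n i := by
  unfold pvSeg
  rw [← List.map_take, List.take_range, Nat.min_eq_left h]

theorem pvSeg_append (f : Int → Int) (n : Int) (k s : Nat) :
    pvSeg f n k ++ pvSeg f (f^[k] n) s = pvSeg f n (k + s) := by
  induction s with
  | zero => simp [pvSeg]
  | succ s ih =>
    rw [← Nat.add_assoc, pvSeg_succ, pvSeg_succ, ← List.append_assoc, ih,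
      ← Function.iterate_add_apply]
    rw [Nat.add_comm s k]

theorem pvSeg_shift_one (f : Int → Int) (v : Int) (s : Nat) :
    [v] ++ pvSeg f (f v) s = pvSeg f v (s+1) := by
  have h1 : pvSeg f v 1 = [v] := by simp [pvSeg]
  have h2 : f^[1] v = f v := by simp
  rw [← h1, ← h2, pvSeg_append, Nat.add_comm]

/-- once the walk's current value is already in the path, the walk stops. -/
theorem pvWlk_stop (f : Int → Int) (N : Int) (fuel : Nat) (p : List Int) (v : Int)
    (h : ¬ (v ≤ N ∧ v ∉ p)) : pvWlk f N fuel p v = (p, v) := by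
  cases fuel with
  | zero => rfl
  | succ fuel => simp [pvWlk, h]

theorem pvWlk_step (f : Int → Int) (N : Int) (fuel : Nat) (p : List Int) (v : Int)
    (h : v ≤ N ∧ v ∉ p) :
    pvWlk f N (fuel+1) p v = pvWlk f N fuel (p ++ [v]) (f v) := by
  simp [pvWlk, h]

/-- Reach the end of a distinct in-bounds segment in ≤ its length many steps. -/
theorem pvWlk_run (f : Int → Int) (N : Int) :
    ∀ (s fuel : Nat) (p : List Int) (v : Int),
      s ≤ fuel →
      (∀ i, i < s → f^[i] v ≤ N ∧ f^[i] v ∉ p ++ pvSeg f v i) →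
      pvWlk f N fuel p v = pvWlk f N (fuel - s) (p ++ pvSeg f v s) (f^[s] v) := by
  intro s
  induction s with
  | zero => intro fuel p v _ _; simp [pvSeg]
  | succ s ih =>
    intro fuel p v hs h
    obtain ⟨fuel, rfl⟩ : ∃ fuel', fuel = fuel' + 1 := ⟨fuel - 1, by omega⟩
    have h0 := h 0 (by omega)
    simp [pvSeg] at h0
    rw [pvWlk_step f N fuel p v ⟨h0.1, h0.2⟩]
    have hrec := ih fuel (p ++ [v]) (f v) (by omega) ?_
    · rw [hrec]
      have hseg : (p ++ [v]) ++ pvSeg f (f v) s = p ++ pvSeg f v (s+1) := by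
        rw [List.append_assoc, pvSeg_shift_one]
      rw [hseg, ← Function.iterate_succ_apply]
      congr 1
      omega
    · intro i hi
      have hh := h (i+1) (by omega)
      rw [Function.iterate_succ_apply] at hh
      refine ⟨hh.1, ?_⟩
      intro hmem
      apply hh.2
      rw [List.append_assoc, pvSeg_shift_one] at hmem
      simpa using hmem

/-- General decomposition of any walk result. -/
theorem pvWlk_spec (f : Int → Int) (N : Int) :
    ∀ (fuel : Nat) (p : List Int) (v : Int),
      ∃ s : Nat,
        (pvWlk f N fuel p v).1 = p ++ pvSeg f v s ∧
        (pvWlk f N fuel p v).2 = f^[s] v ∧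
        (∀ i, i < s → f^[i] v ≤ N) ∧
        (s = 0 → fuel = 0 ∨ ¬ (v ≤ N ∧ v ∉ p)) := by
  intro fuel
  induction fuel with
  | zero => intro p v; exact ⟨0, by simp [pvWlk, pvSeg]⟩
  | succ fuel ih =>
    intro p v
    by_cases hg : v ≤ N ∧ v ∉ p
    · rw [pvWlk_step f N fuel p v hg]
      obtain ⟨s, h1, h2, h3, _⟩ := ih (p ++ [v]) (f v)
      refine ⟨s + 1, ?_, ?_, ?_, by omega⟩
      · rw [h1, List.append_assoc, pvSeg_shift_one]
      · rw [h2, Function.iterate_succ_apply]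
      · intro i hi
        cases i with
        | zero => simpa using hg.1
        | succ i => rw [Function.iterate_succ_apply]; exact h3 i (by omega)
    · rw [pvWlk_stop f N (fuel+1) p v hg]
      exact ⟨0, by simp [pvSeg], by simp, by simp, fun _ => Or.inr hg⟩

-- ---- periodicity ----

theorem pvIter_mul (f : Int → Int) (n : Int) (j : Nat) (h : f^[j] n = n) :
    ∀ a : Nat, f^[j*a] n = n := by
  intro a
  induction a with
  | zero => simp
  | succ a ih =>
    have : j * (a+1) = j + j * a := by ring
    rw [this, Function.iterate_add_apply, ih, h]

theorem pvPeriodic_iter_bounds (f : Int → Int) (N n : Int) (h : pvPeriodic f N n) :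
    ∀ i : Nat, 0 ≤ f^[i] n ∧ f^[i] n ≤ N := by
  obtain ⟨j, hj1, hret, hb⟩ := h
  intro i
  have hdm : i = i % j + j * (i / j) := by
    rw [Nat.mod_add_div]
  have : f^[i] n = f^[i % j] n := by
    conv_lhs => rw [hdm]
    rw [Function.iterate_add_apply, pvIter_mul f n j hret]
  rw [this]
  exact hb _ (le_of_lt (Nat.mod_lt _ (by omega)))

theorem pvSeg_nodup_of_minimal (f : Int → Int) (n : Int) (j : Nat)
    (hj : 1 ≤ j) (hret : f^[j] n = n)
    (hmin : ∀ i, 1 ≤ i → i < j → f^[i] n ≠ n) : (pvSeg f n j).Nodup := by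
  unfold pvSeg
  refine List.Nodup.map_on ?_ (List.nodup_range)
  intro a ha b hb heq
  simp at ha hb
  by_contra hne
  rcases Nat.lt_or_ge a b with hab | hab
  · have h1 : f^[j - b + a] n = n := by
      have e1 : f^[j - b] (f^[b] n) = n := by
        rw [← Function.iterate_add_apply]
        have : j - b + b = j := by omega
        rw [this, hret]
      rw [← heq, ← Function.iterate_add_apply] at e1
      exact e1
    exact hmin (j - b + a) (by omega) (by omega) h1
  · have hab' : b < a := by omega
    have h1 : f^[j - a + b] n = n := by
      have e1 : f^[j - a] (f^[a] n) = n := by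
        rw [← Function.iterate_add_apply]
        have : j - a + a = j := by omega
        rw [this, hret]
      rw [heq, ← Function.iterate_add_apply] at e1
      exact e1
    exact hmin (j - a + b) (by omega) (by omega) h1

/-- a periodic point's run: the walk goes once around the cycle and stops at n. -/
theorem pvRes_of_periodic (f : Int → Int) (N n : Int) (hN : 0 ≤ N)
    (h : pvPeriodic f N n) (j : Nat)
    (hj : 1 ≤ j) (hret : f^[j] n = n)
    (hmin : ∀ i, 1 ≤ i → i < j → f^[i] n ≠ n) :
    pvRes f N n = (pvSeg f n j, n) := by
  have hnd := pvSeg_nodup_of_minimal f n j hj hret hmin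
  have hbnd := pvPeriodic_iter_bounds f N n h
  have hlen : j ≤ (N+1).toNat := by
    have hsub : (pvSeg f n j).toFinset ⊆ Finset.Icc 0 N := by
      intro x hx
      rw [List.mem_toFinset, mem_pvSeg] at hx
      obtain ⟨i, _, rfl⟩ := hx
      simp [Finset.mem_Icc]
      exact hbnd i
    have hcard := Finset.card_le_card hsub
    rw [List.toFinset_card_of_nodup hnd, Int.card_Icc] at hcard
    simpa [length_pvSeg] using hcard
  have hrun := pvWlk_run f N j (N+2).toNat [] n (by omega) ?_
  · unfold pvRes
    rw [hrun, hret, pvWlk_stop]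
    · simp
    · intro hg
      apply hg.2
      simp only [List.nil_append, mem_pvSeg]
      exact ⟨0, by omega, rfl⟩
  · intro i hi
    refine ⟨(hbnd i).2, ?_⟩
    simp only [List.nil_append, mem_pvSeg]
    rintro ⟨i', hi', heq⟩
    have h1 : (pvSeg f n j)[i']'(by rw [length_pvSeg]; omega) = f^[i'] n :=
      pvSeg_getElem f n j i' (by omega)
    have h2 : (pvSeg f n j)[i]'(by rw [length_pvSeg]; omega) = f^[i] n :=
      pvSeg_getElem f n j i (by omega)
    have : i' = i := hnd.getElem_inj_iff.mp (h1.trans (heq.trans h2.symm))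
    omega

theorem pvOnCyc_of_periodic (f : Int → Int) (N n : Int) (hN : 0 ≤ N)
    (h : pvPeriodic f N n) : pvOnCyc f N n := by
  have hex : ∃ i : Nat, 1 ≤ i ∧ f^[i] n = n := by
    obtain ⟨j, hj1, hret, _⟩ := h
    exact ⟨j, hj1, hret⟩
  classical
  let j0 := Nat.find hex
  have hspec := Nat.find_spec hex
  have hmin : ∀ i, 1 ≤ i → i < j0 → f^[i] n ≠ n := by
    intro i h1 h2 hcon
    exact Nat.find_min hex h2 ⟨h1, hcon⟩
  unfold pvOnCyc
  rw [pvRes_of_periodic f N n hN h j0 hspec.1 hspec.2 hmin]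

theorem pvPeriodic_of_onCyc (f : Int → Int) (N n : Int)
    (h0 : 0 ≤ n) (hn : n ≤ N) (hN : 0 ≤ N)
    (hf : ∀ v, 0 ≤ v → v ≤ N → 0 ≤ f v)
    (h : pvOnCyc f N n) : pvPeriodic f N n := by
  obtain ⟨s, h1, h2, h3, h4⟩ := pvWlk_spec f N (N+2).toNat [] n
  unfold pvOnCyc pvRes at h
  rw [h2] at h
  have hs : 1 ≤ s := by
    rcases Nat.eq_zero_or_pos s with hz | hp
    · rcases h4 hz with hf | hg
      · omega
      · exact absurd ⟨hn, by simp⟩ hg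
    · exact hp
  have hb : ∀ i, i ≤ s → 0 ≤ f^[i] n ∧ f^[i] n ≤ N := by
    intro i hi
    induction i with
    | zero => simpa using ⟨h0, hn⟩
    | succ i ih =>
      rcases Nat.lt_or_ge (i+1) s with hlt | hge
      · have hih := ih (by omega)
        constructor
        · rw [Function.iterate_succ_apply']
          exact hf _ hih.1 (h3 i (by omega))
        · exact h3 (i+1) hlt
      · have : i + 1 = s := by omega
        rw [this, h]
        exact ⟨h0, hn⟩
  exact ⟨s, hs, h, hb⟩

-- ---- closed sets under f ----

theorem pvClosed_iterate (f : Int → Int) (q : List Int)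
    (hq : ∀ x ∈ q, f x ∈ q) (v : Int) (hv : v ∈ q) : ∀ j : Nat, f^[j] v ∈ q := by
  intro j
  induction j with
  | zero => simpa
  | succ j ih => rw [Function.iterate_succ_apply']; exact hq _ ih

theorem pvShape_closed (f : Int → Int) (nxt : Int) (q : List Int) (hne : q ≠ [])
    (hq : q = pvSeg f nxt q.length) (hlast : f (f^[q.length - 1] nxt) ∈ q) :
    ∀ x ∈ q, f x ∈ q := by
  intro x hx
  have hL : 1 ≤ q.length := by
    cases q with
    | nil => exact absurd rfl hne
    | cons a l => simp
  rw [hq, mem_pvSeg] at hx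
  obtain ⟨i, hi, rfl⟩ := hx
  rw [hq] at hi ⊢
  rw [length_pvSeg] at hi
  rcases Nat.lt_or_ge (i+1) q.length with hlt | hge
  · rw [mem_pvSeg]
    exact ⟨i+1, by simpa [length_pvSeg] using hlt, by rw [Function.iterate_succ_apply']⟩
  · have : i = q.length - 1 := by omega
    rw [this]
    rw [hq, length_pvSeg] at hlast
    exact hlast

/-- a periodic n whose orbit enters a closed set must lie in it. -/
theorem pvPeriodic_mem_closed (f : Int → Int) (N n : Int) (h : pvPeriodic f N n)
    (q : List Int) (hq : ∀ x ∈ q, f x ∈ q) (k : Nat) (hk : f^[k] n ∈ q) : n ∈ q := by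
  obtain ⟨j, hj1, hret, _⟩ := h
  have hmul := pvIter_mul f n j hret (k+1)
  have hge : k ≤ j * (k+1) := by nlinarith
  have : f^[j*(k+1) - k] (f^[k] n) = n := by
    rw [← Function.iterate_add_apply]
    have : j*(k+1) - k + k = j*(k+1) := by omega
    rw [this, hmul]
  rw [← this]
  exact pvClosed_iterate f q hq _ hk _

-- ---- the two successor functions and their agreement ----

theorem pvLow_run (f : Int → Int) (N : Int)
    (h0 : 0 ≤ f 0 ∧ f 0 ≤ 1) (h1 : 0 ≤ f 1 ∧ f 1 ≤ 1) :
    ∀ (fuel : Nat) (p : List Int) (v : Int), 0 ≤ v → v ≤ 1 →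
      0 ≤ (pvWlk f N fuel p v).2 ∧ (pvWlk f N fuel p v).2 ≤ 1 := by
  intro fuel
  induction fuel with
  | zero => intro p v hv0 hv1; exact ⟨hv0, hv1⟩
  | succ fuel ih =>
    intro p v hv0 hv1
    by_cases hg : v ≤ N ∧ v ∉ p
    · rw [pvWlk_step f N fuel p v hg]
      have : v = 0 ∨ v = 1 := by omega
      rcases this with rfl | rfl
      · exact ih _ _ h0.1 h0.2
      · exact ih _ _ h1.1 h1.2
    · rw [pvWlk_stop f N (fuel+1) p v hg]
      exact ⟨hv0, hv1⟩

theorem pvBridge_run (fa fb : Int → Int) (N : Int)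
    (ha0 : fa 0 = 0) (ha1 : fa 1 = 1) (hb0 : fb 0 = 0) (hb1 : fb 1 = 0)
    (hagree : ∀ v, 2 ≤ v → v ≤ N → fa v = fb v)
    (hnn : ∀ v, 0 ≤ v → v ≤ N → 0 ≤ fa v) :
    ∀ (fuel : Nat) (p : List Int) (v : Int), (0:Int) ∉ p → (1:Int) ∉ p → 2 ≤ v →
      pvWlk fa N fuel p v = pvWlk fb N fuel p v ∨
      ((pvWlk fa N fuel p v).2 ≤ 1 ∧ (pvWlk fb N fuel p v).2 ≤ 1) := by
  intro fuel
  induction fuel with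
  | zero => intro p v _ _ _; exact Or.inl rfl
  | succ fuel ih =>
    intro p v hp0 hp1 hv2
    by_cases hg : v ≤ N ∧ v ∉ p
    · rw [pvWlk_step fa N fuel p v hg, pvWlk_step fb N fuel p v hg,
        hagree v hv2 hg.1]
      by_cases hw : 2 ≤ fb v
      · exact ih (p ++ [v]) (fb v) (by simp [hp0]; omega) (by simp [hp1]; omega) hw
      · right
        have hw0 : 0 ≤ fb v := by
          rw [← hagree v hv2 hg.1]
          exact hnn v (by omega) hg.1
        constructor
        · exact (pvLow_run fa N (by simp [ha0]) (by simp [ha1]) fuel (p ++ [v]) (fb v)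
            hw0 (by omega)).2
        · exact (pvLow_run fb N (by simp [hb0]) (by simp [hb1]) fuel (p ++ [v]) (fb v)
            hw0 (by omega)).2
    · rw [pvWlk_stop fa N (fuel+1) p v hg, pvWlk_stop fb N (fuel+1) p v hg]
      exact Or.inl rfl

-- ---- table access helpers ----

theorem pvSize_set {A : Type} (T : Array A) (i : Int) (v : A) :
    (pvAset T i v).size = T.size := by
  rw [pvAset]
  split
  · rw [Array.size_set]
  · rfl

theorem pvGet_set_self {A : Type} (T : Array A) (d : A) (i : Int) (v : A)
    (h0 : 0 ≤ i) (h1 : i < (T.size : Int)) :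
    pvAget (pvAset T i v) i d = v := by
  rw [pvAset, dif_pos ⟨h0, h1⟩, pvAget,
    dif_pos (⟨h0, by simpa [Array.size_set] using h1⟩ :
      0 ≤ i ∧ i < ((T.set i.toNat v (by omega)).size : Int))]
  exact Array.getElem_set_self _

theorem pvGet_set_other {A : Type} (T : Array A) (d : A) (i j : Int) (v : A)
    (h0 : 0 ≤ i) (hj : 0 ≤ j) (hne : j ≠ i) :
    pvAget (pvAset T i v) j d = pvAget T j d := by
  rw [pvAset]
  split
  · next h =>
    rw [pvAget, pvAget]
    rcases Nat.lt_or_ge j.toNat T.size with hj1 | hj1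
    · rw [dif_pos (⟨hj, by simpa [Array.size_set] using (by omega : j < (T.size:Int))⟩ :
          0 ≤ j ∧ j < ((T.set i.toNat v (by omega)).size : Int)),
        dif_pos (⟨hj, by omega⟩ : 0 ≤ j ∧ j < (T.size : Int))]
      exact Array.getElem_set_ne _ _ (by omega)
    · rw [dif_neg (by simp [Array.size_set]; intro _; omega),
        dif_neg (by intro hcon; omega)]
  · rfl

theorem pvSet_set_self {A : Type} (T : Array A) (i : Int) (v w : A) (h0 : 0 ≤ i) :
    pvAset (pvAset T i v) i w = pvAset T i w := by
  by_cases h : 0 ≤ i ∧ i < (T.size : Int)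
  · rw [show pvAset T i v = T.set i.toNat v (by omega) from by rw [pvAset, dif_pos h]]
    rw [pvAset, dif_pos (⟨h.1, by simpa [Array.size_set] using h.2⟩ :
        0 ≤ i ∧ i < ((T.set i.toNat v (by omega)).size : Int))]
    rw [pvAset, dif_pos h]
    exact Array.set_set v (by omega)
  · rw [show pvAset T i v = T from by rw [pvAset, dif_neg h]]

theorem pvSet_self_eq {A : Type} (T : Array A) (d : A) (i : Int)
    (h : pvAget T i d = d) (h0 : 0 ≤ i) (h1 : i < (T.size : Int)) :
    pvAset T i d = T := by
  rw [pvAget, dif_pos ⟨h0, h1⟩] at h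
  rw [pvAset, dif_pos ⟨h0, h1⟩, ← h]
  exact Array.set_getElem_self _

theorem pvAget_toArray {A : Type} (l : List A) (i : Int) (d : A) (h0 : 0 ≤ i) :
    pvAget l.toArray i d = PySem.List.pyGetD l i d := by
  rw [pvAget]
  split
  · next h =>
    rw [PySem.List.pyGetD_eq_getElem l d h0 (by simpa using h.2)]
    exact List.getElem_toArray _
  · next h =>
    rw [PySem.List.pyGetD_of_none]
    rw [PySem.List.pyGet?_eq_none_iff]
    intro hcon
    rcases hcon with ⟨_, hlt⟩
    simp at h
    have := h h0
    omega

-- ---- auxiliary iterate facts ----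

theorem pvNodup_length_le (N : Int) (l : List Int) (hnd : l.Nodup)
    (hb : ∀ x ∈ l, 0 ≤ x ∧ x ≤ N) : l.length ≤ (N+1).toNat := by
  have hsub : l.toFinset ⊆ Finset.Icc 0 N := by
    intro x hx
    rw [List.mem_toFinset] at hx
    simp [Finset.mem_Icc]
    exact hb x hx
  have hcard := Finset.card_le_card hsub
  rw [List.toFinset_card_of_nodup hnd, Int.card_Icc] at hcard
  omega

theorem pvIter_pos (f : Int → Int) (N n : Int)
    (Hpos : ∀ v, 1 ≤ v → v ≤ N → 1 ≤ f v) (hn : 1 ≤ n) :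
    ∀ j, (∀ i, i < j → 0 ≤ f^[i] n ∧ f^[i] n ≤ N) → 1 ≤ f^[j] n := by
  intro j
  induction j with
  | zero => intro _; simpa using hn
  | succ j ih =>
    intro h
    rw [Function.iterate_succ_apply']
    exact Hpos _ (ih (fun i hi => h i (by omega))) (h j (by omega)).2

theorem pvOne_absorb (f : Int → Int) (n : Int) (Hf1 : f 1 = 1) (k : Nat)
    (hk : f^[k] n = 1) : ∀ s, f^[k+s] n = 1 := by
  intro s
  induction s with
  | zero => simpa using hk
  | succ s ih =>
    have : k + (s+1) = (k+s) + 1 := by omega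
    rw [this, Function.iterate_succ_apply', ih, Hf1]

theorem pvNotPeriodic_of_one (f : Int → Int) (N n : Int) (Hf1 : f 1 = 1) (k : Nat)
    (hk : f^[k] n = 1) (hn : 2 ≤ n) : ¬ pvPeriodic f N n := by
  rintro ⟨j, hj1, hret, _⟩
  have hmul := pvIter_mul f n j hret (k+1)
  have hge : k ≤ j * (k+1) := by nlinarith
  have habs := pvOne_absorb f n Hf1 k hk (j*(k+1) - k)
  rw [show k + (j*(k+1) - k) = j*(k+1) by omega, hmul] at habs
  omega

/-- walk result for a first return at time j over a distinct segment. -/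
theorem pvRes_return (f : Int → Int) (N n : Int) (hN : 0 ≤ N) (j : Nat) (hj : 1 ≤ j)
    (hret : f^[j] n = n) (hnd : (pvSeg f n j).Nodup)
    (hb : ∀ i, i ≤ j → 0 ≤ f^[i] n ∧ f^[i] n ≤ N) :
    pvRes f N n = (pvSeg f n j, n) := by
  refine pvRes_of_periodic f N n hN ⟨j, hj, hret, hb⟩ j hj hret ?_
  intro i h1 h2 hcon
  have e1 : (pvSeg f n j)[i]'(by rw [length_pvSeg]; omega) = f^[i] n :=
    pvSeg_getElem f n j i (by omega)
  have e2 : (pvSeg f n j)[0]'(by rw [length_pvSeg]; omega) = n := by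
    rw [pvSeg_getElem f n j 0 (by omega)]; rfl
  have := hnd.getElem_inj_iff.mp (e1.trans (hcon.trans e2.symm))
  omega

-- ---- A's while loop establishes the invariant ----

theorem pvAWhile_spec (N n : Int) (fsum : Array Int) (f : Int → Int)
    (hfv : ∀ v : Int, 0 ≤ v → f v = pvAget fsum v 0)
    (hN : 6 ≤ N) (hn2 : 2 ≤ n) (hnN : n ≤ N)
    (Hnn : ∀ v, 0 ≤ v → v ≤ N → 0 ≤ f v)
    (Hpos : ∀ v, 1 ≤ v → v ≤ N → 1 ≤ f v)
    (Hf1 : f 1 = 1)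
    (T0 : Array (List Int)) (hTlen : T0.size = (N+1).toNat)
    (hT1 : pvAget T0 1 [] = [1])
    (hTproc : ∀ m : Int, 2 ≤ m → m < n → pvPhi f N m (pvAget T0 m []))
    (hTun : ∀ m : Int, n ≤ m → m ≤ N → pvAget T0 m [] = []) :
    ∀ (fuel k : Nat),
      (pvSeg f n k).Nodup →
      (∀ j, j ≤ k → 0 ≤ f^[j] n ∧ f^[j] n ≤ N) →
      (N + 2).toNat ≤ fuel + k →
      ∃ c, pvAWhile N n fsum fuel (pvAset T0 n (pvSeg f n k)) (f^[k] n)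
            (pvAget fsum (f^[k] n) 0) = pvAset T0 n c ∧
           pvPhi f N n c := by
  intro fuel
  induction fuel with
  | zero =>
    intro k hnd hb hfuel
    have hk := pvNodup_length_le N (pvSeg f n k) hnd ?_
    · rw [length_pvSeg] at hk
      omega
    · intro x hx
      rw [mem_pvSeg] at hx
      obtain ⟨j, hj, rfl⟩ := hx
      exact hb j (by omega)
  | succ fuel ih =>
    intro k hnd hb hfuel
    have h0n : (0:Int) ≤ n := by omega
    have hTl : (n : Int) < T0.size := by rw [hTlen]; omega
    have hcb := hb k (le_refl k)
    have hnxt : pvAget fsum (f^[k] n) 0 = f (f^[k] n) := (hfv _ hcb.1).symm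
    have hget : pvAget (pvAset T0 n (pvSeg f n k)) n [] = pvSeg f n k :=
      pvGet_set_self T0 [] n _ h0n hTl
    simp only [pvAWhile]
    rw [hget]
    by_cases hmem : f^[k] n ∈ pvSeg f n k
    · -- loop guard fails: the walk has closed on itself
      rw [if_pos hmem]
      refine ⟨pvSeg f n k, rfl, ?_, ?_⟩
      · -- onCyc → c is the canonical path
        intro hcyc
        rw [mem_pvSeg] at hmem
        obtain ⟨j, hj, heq⟩ := hmem
        have hk1 : 1 ≤ k := by omega
        rcases Nat.eq_zero_or_pos j with rfl | hjpos
        · -- returned to n itself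
          simp only [Function.iterate_zero_apply] at heq
          rw [pvOnCyc] at hcyc
          rw [pvRes_return f N n (by omega) k hk1 heq.symm hnd (fun i hi => hb i hi)]
        · -- closed on an interior point: n is not periodic, contradiction
          exfalso
          have hper := pvPeriodic_of_onCyc f N n h0n hnN (by omega) Hnn hcyc
          obtain ⟨j', hj'1, hret, _⟩ := hper
          have hmul := pvIter_mul f n j' hret (k+1)
          have hge : k ≤ j' * (k+1) := by nlinarith
          set M := j' * (k+1) with hM
          have h1 : f^[(M - k) + j] n = n := by
            have e1 : f^[M - k] (f^[k] n) = n := by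
              rw [← Function.iterate_add_apply, show M - k + k = M by omega, hmul]
            rw [← heq, ← Function.iterate_add_apply] at e1
            exact e1
          have h2 : f^[k - j] n = n := by
            have : f^[k - j] (f^[(M - k) + j] n) = f^[(k - j) + ((M - k) + j)] n := by
              rw [← Function.iterate_add_apply]
            rw [h1, show (k - j) + ((M - k) + j) = M by omega, hmul] at this
            exact this
          have e1 : (pvSeg f n k)[k - j]'(by rw [length_pvSeg]; omega) = f^[k-j] n :=
            pvSeg_getElem f n k (k-j) (by omega)
          have e2 : (pvSeg f n k)[0]'(by rw [length_pvSeg]; omega) = n := by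
            rw [pvSeg_getElem f n k 0 (by omega)]; rfl
          have := hnd.getElem_inj_iff.mp (e1.trans (h2.trans e2.symm))
          omega
      · -- shape of the returned chain
        intro hne
        have hk1 : 1 ≤ k := by
          by_contra hcon
          have : k = 0 := by omega
          subst this
          simp [pvSeg] at hmem
        refine ⟨by rw [length_pvSeg], ?_, ?_⟩
        · intro x hx
          rw [mem_pvSeg] at hx
          obtain ⟨j, hj, rfl⟩ := hx
          exact hb j (by omega)
        · have hstep : f^[k] n = f (f^[k-1] n) := by
            conv_lhs => rw [show k = (k-1)+1 by omega]
            rw [Function.iterate_succ_apply']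
          rw [length_pvSeg, ← hstep]
          exact hmem
    · rw [if_neg hmem]
      have hnd1 : (pvSeg f n (k+1)).Nodup := by
        rw [pvSeg_succ]
        exact List.Nodup.append hnd (List.nodup_singleton _)
          (fun a ha hb' => hmem (by simpa using (List.mem_singleton.mp hb') ▸ ha))
      have hS1 : pvAset (pvAset T0 n (pvSeg f n k)) n
          (pvSeg f n k ++ [f^[k] n]) = pvAset T0 n (pvSeg f n (k+1)) := by
        rw [pvSet_set_self T0 n _ _ h0n, pvSeg_succ]
      rw [hS1]
      by_cases hesc : N < pvAget fsum (f^[k] n) 0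
      · -- next value escapes the limit: chain discarded
        rw [if_pos hesc]
        refine ⟨[], by rw [pvSet_set_self T0 n _ _ h0n], ?_, by simp⟩
        intro hcyc
        exfalso
        have hper := pvPeriodic_of_onCyc f N n h0n hnN (by omega) Hnn hcyc
        have := (pvPeriodic_iter_bounds f N n hper (k+1)).2
        rw [Function.iterate_succ_apply', ← hnxt] at this
        omega
      · rw [if_neg hesc]
        rw [hnxt] at hesc ⊢
        have hnxtb : 0 ≤ f (f^[k] n) ∧ f (f^[k] n) ≤ N :=
          ⟨Hnn _ hcb.1 hcb.2, by omega⟩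
        have hbnd1 : ∀ j, j ≤ k+1 → 0 ≤ f^[j] n ∧ f^[j] n ≤ N := by
          intro j hj
          rcases Nat.lt_or_ge j (k+1) with hlt | hge
          · exact hb j (by omega)
          · have : j = k + 1 := by omega
            subst this
            rw [Function.iterate_succ_apply']
            exact hnxtb
        by_cases hself : f (f^[k] n) = n
        · -- next value is n itself: the table entry for n is the partial chain
          have hq : pvAget (pvAset T0 n (pvSeg f n (k+1))) (f (f^[k] n)) []
              = pvSeg f n (k+1) := by
            rw [hself]
            exact pvGet_set_self T0 [] n _ h0n hTl
          rw [hq]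
          rw [if_neg (by simp [pvSeg_succ])]
          have hcons : pvSeg f n (k+1) = n :: pvSeg f (f n) k := by
            rw [← pvSeg_shift_one]; rfl
          have hidx : (if n ∈ pvSeg f n (k+1) then
              (PySem.List.index? (pvSeg f n (k+1)) n).getD (pvSeg f n (k+1)).length
              else if f^[k] n ∈ pvSeg f n (k+1) then
              (PySem.List.index? (pvSeg f n (k+1)) (f^[k] n)).getD (pvSeg f n (k+1)).length
              else (pvSeg f n (k+1)).length) = 0 := by
            rw [if_pos (by rw [hcons]; exact List.mem_cons_self)]
            rw [hcons, PySem.List.index?_cons_self]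
            rfl
          rw [hidx]
          rw [pvGet_set_self T0 [] n _ h0n hTl]
          refine ⟨pvSeg f n (k+1), by rw [List.take_zero, List.append_nil,
            pvSet_set_self T0 n _ _ h0n], ?_, ?_⟩
          · intro _
            have hret : f^[k+1] n = n := by rw [Function.iterate_succ_apply']; exact hself
            rw [pvRes_return f N n (by omega) (k+1) (by omega) hret hnd1 hbnd1]
          · intro _
            refine ⟨by rw [length_pvSeg], ?_, ?_⟩
            · intro x hx
              rw [mem_pvSeg] at hx
              obtain ⟨j, hj, rfl⟩ := hx
              exact hbnd1 j (by omega)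
            · rw [length_pvSeg, show k + 1 - 1 = k by omega, hself]
              rw [mem_pvSeg]
              exact ⟨0, by omega, rfl⟩
        · -- next value is a different entry of the table
          have hnxt0 : (0:Int) ≤ f (f^[k] n) := hnxtb.1
          have hq : pvAget (pvAset T0 n (pvSeg f n (k+1))) (f (f^[k] n)) []
              = pvAget T0 (f (f^[k] n)) [] :=
            pvGet_set_other T0 [] n _ _ h0n hnxt0 hself
          rw [hq]
          by_cases hqe : pvAget T0 (f (f^[k] n)) [] = []
          · -- unvisited: continue the walk
            rw [if_pos hqe]
            have hrec := ih (k+1) hnd1 hbnd1 (by omega)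
            rw [Function.iterate_succ_apply'] at hrec
            exact hrec
          · rw [if_neg hqe]
            -- the memoised entry
            have hpos1 : 1 ≤ f (f^[k] n) := by
              have := pvIter_pos f N n Hpos (by omega) (k+1) (fun i hi => hb i (by omega))
              rwa [Function.iterate_succ_apply'] at this
            by_cases hone : f (f^[k] n) = 1
            · -- hit the fixed point 1
              rw [hone, hT1]
              have hnotc : ¬ pvOnCyc f N n := by
                intro hcyc
                exact pvNotPeriodic_of_one f N n Hf1 (k+1)
                  (by rw [Function.iterate_succ_apply']; exact hone) hn2
                  (pvPeriodic_of_onCyc f N n h0n hnN (by omega) Hnn hcyc)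
              by_cases hc1 : f^[k] n = 1
              · have hidx : (if n ∈ [(1:Int)] then (PySem.List.index? [(1:Int)] n).getD 1
                    else if f^[k] n ∈ [(1:Int)] then
                      (PySem.List.index? [(1:Int)] (f^[k] n)).getD 1
                    else 1) = 0 := by
                  rw [if_neg (by simp; omega), if_pos (by simp [hc1])]
                  rw [hc1, PySem.List.index?_cons_self]
                  rfl
                have hidx' : (if n ∈ [(1:Int)] then (PySem.List.index? [(1:Int)] n).getD
                      ([(1:Int)].length)
                    else if f^[k] n ∈ [(1:Int)] then
                      (PySem.List.index? [(1:Int)] (f^[k] n)).getD ([(1:Int)].length)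
                    else ([(1:Int)].length)) = 0 := by simpa using hidx
                rw [hidx']
                rw [pvGet_set_self T0 [] n _ h0n hTl]
                refine ⟨pvSeg f n (k+1), by rw [List.take_zero, List.append_nil,
                  pvSet_set_self T0 n _ _ h0n], fun hcyc => absurd hcyc hnotc, ?_⟩
                intro _
                refine ⟨by rw [length_pvSeg], ?_, ?_⟩
                · intro x hx
                  rw [mem_pvSeg] at hx
                  obtain ⟨j, hj, rfl⟩ := hx
                  exact hbnd1 j (by omega)
                · rw [length_pvSeg, show k + 1 - 1 = k by omega, hc1, Hf1, mem_pvSeg]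
                  exact ⟨k, by omega, hc1⟩
              · have hidx : (if n ∈ [(1:Int)] then (PySem.List.index? [(1:Int)] n).getD
                      ([(1:Int)].length)
                    else if f^[k] n ∈ [(1:Int)] then
                      (PySem.List.index? [(1:Int)] (f^[k] n)).getD ([(1:Int)].length)
                    else ([(1:Int)].length)) = 1 := by
                  rw [if_neg (by simp; omega), if_neg (by simp [hc1])]
                  rfl
                rw [hidx]
                rw [pvGet_set_self T0 [] n _ h0n hTl]
                have hseg2 : pvSeg f n (k+1) ++ [(1:Int)].take 1 = pvSeg f n (k+2) := by
                  rw [show [(1:Int)].take 1 = [(1:Int)] by rfl, ← hone,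
                    ← Function.iterate_succ_apply' f k n, ← pvSeg_succ]
                rw [hseg2, pvSet_set_self T0 n _ _ h0n]
                refine ⟨pvSeg f n (k+2), rfl, fun hcyc => absurd hcyc hnotc, ?_⟩
                intro _
                have hit2 : f^[k+1] n = 1 := by rw [Function.iterate_succ_apply']; exact hone
                refine ⟨by rw [length_pvSeg], ?_, ?_⟩
                · intro x hx
                  rw [mem_pvSeg] at hx
                  obtain ⟨j, hj, rfl⟩ := hx
                  rcases Nat.lt_or_ge j (k+2) with _ | _
                  · rcases Nat.lt_or_ge j (k+2) with hj2 | hj2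
                    · rcases Nat.eq_or_lt_of_le (Nat.lt_succ_iff.mp hj2) with rfl | hj3
                      · rw [hit2]; omega
                      · exact hbnd1 j (by omega)
                    · omega
                  · exact hbnd1 j (by omega)
                · rw [length_pvSeg, show k + 2 - 1 = k + 1 by omega, hit2, Hf1, mem_pvSeg]
                  exact ⟨k+1, by omega, hit2⟩
            · -- a genuinely earlier entry: 2 ≤ nxt < n, use its invariant
              set w := f (f^[k] n) with hw
              have hw2 : 2 ≤ w := by omega
              have hwlt : w < n := by
                by_contra hcon
                exact hqe (hTun w (by omega) (by omega))
              set q := pvAget T0 w [] with hqdef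
              obtain ⟨hq_eq, hq_bnd, hq_last⟩ := (hTproc w hw2 hwlt).2 hqe
              rw [← hqdef] at hq_eq hq_bnd hq_last
              set L := q.length with hLdef
              have hL : 1 ≤ L := by
                rcases q with _ | ⟨a, l⟩
                · exact absurd rfl hqe
                · simp [hLdef]
              have hwit : f^[k+1] n = w := by rw [Function.iterate_succ_apply']
              have hqget : ∀ (j : Nat) (_hj : j < L), q[j]'(by omega) = f^[j] w := by
                intro j hj
                rw [List.getElem_of_eq hq_eq]
                exact pvSeg_getElem f w L j hj
              have hqmem : ∀ x, x ∈ q ↔ ∃ j, j < L ∧ f^[j] w = x := by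
                intro x
                conv_lhs => rw [hq_eq]
                exact mem_pvSeg f w x L
              have hitq : ∀ j : Nat, f^[k+1+j] n = f^[j] w := by
                intro j
                rw [show k+1+j = j + (k+1) by omega, Function.iterate_add_apply, hwit]
              have hclosed : ∀ x ∈ q, f x ∈ q := pvShape_closed f w q hqe hq_eq hq_last
              have hwmem : w ∈ q := by
                rw [hqmem]
                exact ⟨0, by omega, rfl⟩
              -- bounds along the spliced segment
              have hbnd2 : ∀ (t : Nat), t ≤ L → ∀ j, j ≤ k+1+t → 0 ≤ f^[j] n ∧ f^[j] n ≤ N := by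
                intro t ht j hj
                rcases Nat.lt_or_ge j (k+2) with hlt | hge
                · exact hbnd1 j (by omega)
                · have : j = k+1+(j-(k+1)) := by omega
                  rw [this, hitq]
                  rcases Nat.lt_or_ge (j-(k+1)) L with hjL | hjL
                  · exact hq_bnd _ (by rw [hqmem]; exact ⟨_, hjL, rfl⟩)
                  · -- j - (k+1) = L = t; value is f applied to the last element, still in q
                    have hjt : j - (k+1) = L := by omega
                    rw [hjt]
                    have : f^[L] w = f (f^[L-1] w) := by
                      conv_lhs => rw [show L = (L-1)+1 by omega]
                      rw [Function.iterate_succ_apply']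
                    rw [this]
                    exact hq_bnd _ hq_last
              have hsplice : ∀ (t : Nat), t ≤ L →
                  pvSeg f n (k+1) ++ q.take t = pvSeg f n (k+1+t) := by
                intro t ht
                have : q.take t = pvSeg f w t := by
                  conv_lhs => rw [hq_eq]
                  exact pvSeg_take f w L t ht
                rw [this, ← hwit, pvSeg_append]
              rw [pvGet_set_self T0 [] n _ h0n hTl]
              by_cases hn_in : n ∈ q
              · -- n lies on the memoised chain: the cycle through n closes here
                obtain ⟨s0, hs0⟩ : ∃ s0, PySem.List.index? q n = some s0 := by
                  cases h : PySem.List.index? q n with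
                  | none => exact absurd hn_in ((PySem.List.index?_eq_none_iff q n).mp h)
                  | some s0 => exact ⟨s0, rfl⟩
                obtain ⟨hs0lt, hs0v, hs0first⟩ := PySem.List.getElem_of_index?_eq_some hs0
                rw [if_pos hn_in, hs0]
                simp only [Option.getD_some]
                rw [hsplice s0 (by omega), pvSet_set_self T0 n _ _ h0n]
                have hret : f^[k+1+s0] n = n := by
                  rw [hitq, ← hqget s0 hs0lt]
                  exact hs0v
                have hper : pvPeriodic f N n :=
                  ⟨k+1+s0, by omega, hret, fun i hi => hbnd2 s0 (by omega) i hi⟩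
                have hmin : ∀ i, 1 ≤ i → i < k+1+s0 → f^[i] n ≠ n := by
                  intro i h1 h2 hcon
                  rcases Nat.lt_or_ge i (k+1) with hik | hik
                  · have e1 : (pvSeg f n (k+1))[i]'(by rw [length_pvSeg]; omega) = f^[i] n :=
                      pvSeg_getElem f n (k+1) i (by omega)
                    have e2 : (pvSeg f n (k+1))[0]'(by rw [length_pvSeg]; omega) = n := by
                      rw [pvSeg_getElem f n (k+1) 0 (by omega)]; rfl
                    have := hnd1.getElem_inj_iff.mp (e1.trans (hcon.trans e2.symm))
                    omega
                  · have hj' : i - (k+1) < s0 := by omega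
                    apply hs0first (i - (k+1)) (by omega)
                    rw [hqget _ (by omega), ← hitq, show k+1+(i-(k+1)) = i by omega]
                    exact hcon
                refine ⟨pvSeg f n (k+1+s0), rfl, ?_, ?_⟩
                · intro _
                  rw [pvRes_of_periodic f N n (by omega) hper (k+1+s0) (by omega) hret hmin]
                · intro _
                  refine ⟨by rw [length_pvSeg], ?_, ?_⟩
                  · intro x hx
                    rw [mem_pvSeg] at hx
                    obtain ⟨j, hj, rfl⟩ := hx
                    exact hbnd2 s0 (by omega) j (by omega)
                  · rw [length_pvSeg]
                    have : f (f^[k+1+s0-1] n) = f^[k+1+s0] n := by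
                      conv_rhs => rw [show k+1+s0 = (k+s0)+1 by omega,
                        Function.iterate_succ_apply']
                      rw [show k+1+s0-1 = k+s0 by omega]
                    rw [this, hret, mem_pvSeg]
                    exact ⟨0, by omega, rfl⟩
              · -- n is not on the memoised chain: n cannot be on a cycle
                have hnotc : ¬ pvOnCyc f N n := by
                  intro hcyc
                  have hper := pvPeriodic_of_onCyc f N n h0n hnN (by omega) Hnn hcyc
                  exact hn_in (pvPeriodic_mem_closed f N n hper q hclosed (k+1)
                    (by rw [hwit]; exact hwmem))
                rw [if_neg hn_in]
                by_cases hc_in : f^[k] n ∈ q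
                · obtain ⟨t0, ht0⟩ : ∃ t0, PySem.List.index? q (f^[k] n) = some t0 := by
                    cases h : PySem.List.index? q (f^[k] n) with
                    | none => exact absurd hc_in ((PySem.List.index?_eq_none_iff q _).mp h)
                    | some t0 => exact ⟨t0, rfl⟩
                  obtain ⟨ht0lt, ht0v, _⟩ := PySem.List.getElem_of_index?_eq_some ht0
                  rw [if_pos hc_in, ht0]
                  simp only [Option.getD_some]
                  rw [hsplice t0 (by omega), pvSet_set_self T0 n _ _ h0n]
                  refine ⟨pvSeg f n (k+1+t0), rfl, fun hcyc => absurd hcyc hnotc, ?_⟩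
                  intro _
                  refine ⟨by rw [length_pvSeg], ?_, ?_⟩
                  · intro x hx
                    rw [mem_pvSeg] at hx
                    obtain ⟨j, hj, rfl⟩ := hx
                    exact hbnd2 t0 (by omega) j (by omega)
                  · rw [length_pvSeg]
                    have : f (f^[k+1+t0-1] n) = f^[t0] w := by
                      have e : f (f^[k+1+t0-1] n) = f^[k+1+t0] n := by
                        conv_rhs => rw [show k+1+t0 = (k+1+t0-1)+1 by omega,
                          Function.iterate_succ_apply']
                      rw [e, hitq]
                    rw [this, ← hqget t0 ht0lt, ht0v, mem_pvSeg]
                    exact ⟨k, by omega, rfl⟩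
                · rw [if_neg hc_in]
                  rw [hsplice L (le_refl L), pvSet_set_self T0 n _ _ h0n]
                  refine ⟨pvSeg f n (k+1+L), rfl, fun hcyc => absurd hcyc hnotc, ?_⟩
                  intro _
                  refine ⟨by rw [length_pvSeg], ?_, ?_⟩
                  · intro x hx
                    rw [mem_pvSeg] at hx
                    obtain ⟨j, hj, rfl⟩ := hx
                    exact hbnd2 L (le_refl L) j (by omega)
                  · rw [length_pvSeg]
                    have h1 : f (f^[k+1+L-1] n) = f (f^[L-1] w) := by
                      rw [show k+1+L-1 = k+1+(L-1) by omega, hitq]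
                    rw [h1]
                    obtain ⟨j', hj', hval⟩ := (hqmem _).mp hq_last
                    rw [mem_pvSeg]
                    exact ⟨k+1+j', by omega, by rw [hitq]; exact hval⟩


-- ---- generic additive table-update fold ----

theorem pvFold_set_length {A : Type} (g : Array A → Int → A) :
    ∀ (rs : List Int) (T : Array A),
      (rs.foldl (fun T r => pvAset T r (g T r)) T).size = T.size := by
  intro rs
  induction rs with
  | nil => intro T; rfl
  | cons r rs ih =>
    intro T
    rw [List.foldl_cons, ih, pvSize_set]

theorem pvFold_upd {A : Type} (d0 : A) (upd : A → A) :
    ∀ (rs : List Int) (T : Array A), rs.Nodup →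
      (∀ r ∈ rs, 0 ≤ r ∧ r < (T.size : Int)) → ∀ m : Int, 0 ≤ m →
      pvAget
          (rs.foldl (fun T r => pvAset T r (upd (pvAget T r d0))) T) m d0
        = if m ∈ rs then upd (pvAget T m d0) else pvAget T m d0 := by
  intro rs
  induction rs with
  | nil => intro T _ _ m _; simp
  | cons r rs ih =>
    intro T hnd hb m hm
    have hr := hb r List.mem_cons_self
    have hnd' := List.nodup_cons.mp hnd
    rw [List.foldl_cons, ih _ hnd'.2
      (fun r' hr' => by rw [pvSize_set]; exact hb r' (List.mem_cons_of_mem _ hr'))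
      m hm]
    by_cases hmr : m = r
    · subst hmr
      rw [if_neg hnd'.1, if_pos List.mem_cons_self,
        pvGet_set_self T d0 m _ hr.1 (by exact_mod_cast hr.2)]
    · rw [pvGet_set_other T d0 r m _ hr.1 hm hmr]
      by_cases hmrs : m ∈ rs
      · rw [if_pos hmrs, if_pos (List.mem_cons_of_mem _ hmrs)]
      · rw [if_neg hmrs, if_neg (by simp [hmr, hmrs])]

theorem pvNodup_pyRange_pos (a b st : Int) (h : 0 < st) :
    (PySem.List.pyRange a b st).Nodup := by
  rw [PySem.List.pyRange_of_pos a b h]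
  refine List.Nodup.map_on ?_ List.nodup_range
  intro x _ y _ hxy
  have hxy' : st * (x:Int) = st * (y:Int) := by omega
  have := mul_left_cancel₀ (by omega : st ≠ 0) hxy'
  exact_mod_cast this

-- membership of the inner sieve range of Source B
theorem pvMem_sieve_range (N d m : Int) (hd : 1 ≤ d) (hm : m ≤ N) :
    m ∈ PySem.List.pyRange (2*d) (N+1) d ↔ (d ∣ m ∧ 2*d ≤ m) := by
  rw [PySem.List.mem_pyRange_iff_of_pos (by omega)]
  constructor
  · rintro ⟨h1, _, h3⟩
    refine ⟨?_, h1⟩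
    have : m - 2*d + 2*d = m := by ring
    exact this ▸ dvd_add h3 ⟨2, by ring⟩
  · rintro ⟨h1, h2⟩
    exact ⟨h2, by omega, dvd_sub h1 ⟨2, by ring⟩⟩

-- entries of Source B's sieve after the double loop
theorem pvBSieve_fold (N : Int) :
    ∀ (ds : List Int) (T : Array Int), (∀ x ∈ ds, 1 ≤ x) → T.size = (N+1).toNat →
      ∀ m : Int, 0 ≤ m → m ≤ N →
      pvAget (ds.foldl (fun l d => (PySem.List.pyRange (2*d) (N+1) d).foldl
          (fun l2 x => pvAset l2 x (pvAget l2 x 0 + d)) l) T) m 0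
        = pvAget T m 0
          + ((ds.filter (fun d => decide (d ∣ m ∧ 2*d ≤ m))).sum) := by
  intro ds
  induction ds with
  | nil => intro T _ _ m _ _; simp
  | cons d ds ih =>
    intro T hds hlen m hm hmN
    have hd1 : (1:Int) ≤ d := hds d List.mem_cons_self
    rw [List.foldl_cons]
    have hlen' : ((PySem.List.pyRange (2*d) (N+1) d).foldl
        (fun l2 x => pvAset l2 x (pvAget l2 x 0 + d)) T).size
        = (N+1).toNat := by
      rw [pvFold_set_length (fun l2 x => pvAget l2 x 0 + d)]
      exact hlen
    rw [ih _ (fun x hx => hds x (List.mem_cons_of_mem _ hx)) hlen' m hm hmN]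
    have hinner : pvAget ((PySem.List.pyRange (2*d) (N+1) d).foldl
        (fun l2 x => pvAset l2 x (pvAget l2 x 0 + d)) T) m 0
        = if m ∈ PySem.List.pyRange (2*d) (N+1) d
          then pvAget T m 0 + d else pvAget T m 0 :=
      pvFold_upd (0:Int) (fun z => z + d) _ T (pvNodup_pyRange_pos _ _ _ (by omega))
        (fun r hr => by
          rw [PySem.List.mem_pyRange_iff_of_pos (by omega)] at hr
          constructor
          · omega
          · rw [hlen]; omega)
        m hm
    rw [hinner]
    rw [List.filter_cons]
    by_cases hcond : d ∣ m ∧ 2*d ≤ m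
    · rw [if_pos ((pvMem_sieve_range N d m hd1 hmN).mpr hcond), if_pos (by simpa using hcond)]
      rw [List.sum_cons]
      ring
    · rw [if_neg (fun hc => hcond ((pvMem_sieve_range N d m hd1 hmN).mp hc)),
        if_neg (by simpa using hcond)]

-- membership of the touched indices of get_all_factors_to_limit's inner loop
theorem pvMem_factor_range (N n m : Int) (hn : 2 ≤ n) (hm0 : 0 ≤ m) (hm : m ≤ N) :
    m ∈ (PySem.List.pyRange 2 (PySem.Int.floordiv N n + 1) 1).map (· * n)
      ↔ (n ∣ m ∧ 2*n ≤ m) := by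
  have hfd : PySem.Int.floordiv N n = N / n := Int.fdiv_eq_ediv_of_nonneg _ (by omega)
  simp only [List.mem_map, PySem.List.mem_pyRange_one]
  constructor
  · rintro ⟨k, ⟨hk2, hkN⟩, rfl⟩
    refine ⟨⟨k, by ring⟩, by nlinarith⟩
  · rintro ⟨⟨k, rfl⟩, h2⟩
    refine ⟨k, ⟨by nlinarith, ?_⟩, by ring⟩
    rw [hfd]
    have hkn : k = (n * k) / n := by
      rw [Int.mul_ediv_cancel_left _ (by omega)]
    rw [hkn]
    have := Int.ediv_le_ediv (by omega : (0:Int) < n) hm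
    omega

-- sums of the factor-list entries after get_all_factors_to_limit's double loop
theorem pvAFactors_fold (N : Int) :
    ∀ (ns : List Int) (T : Array (List Int)), (∀ x ∈ ns, 2 ≤ x) → T.size = (N+1).toNat →
      ∀ m : Int, 0 ≤ m → m ≤ N →
      (pvAget (ns.foldl (pvAFactorsStep N) T) m []).sum
        = (pvAget T m []).sum
          + ((ns.filter (fun x => decide (x ∣ m ∧ 2*x ≤ m))).sum) := by
  intro ns
  induction ns with
  | nil => intro T _ _ m _ _; simp
  | cons n ns ih =>
    intro T hns hlen m hm hmN
    have hn2 : (2:Int) ≤ n := hns n List.mem_cons_self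
    rw [List.foldl_cons]
    have hstep : pvAFactorsStep N T n
        = ((PySem.List.pyRange 2 (PySem.Int.floordiv N n + 1) 1).map (· * n)).foldl
            (fun fcs r => pvAset fcs r (pvAget fcs r [] ++ [n])) T := by
      rw [pvAFactorsStep, List.foldl_map]
    have hlen' : (pvAFactorsStep N T n).size = (N+1).toNat := by
      rw [hstep, pvFold_set_length (fun fcs r => pvAget fcs r [] ++ [n])]
      exact hlen
    rw [ih _ (fun x hx => hns x (List.mem_cons_of_mem _ hx)) hlen' m hm hmN]
    have hinner : pvAget (pvAFactorsStep N T n) m []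
        = if m ∈ (PySem.List.pyRange 2 (PySem.Int.floordiv N n + 1) 1).map (· * n)
          then pvAget T m [] ++ [n] else pvAget T m [] := by
      rw [hstep]
      refine pvFold_upd ([] : List Int) (fun c => c ++ [n]) _ T ?_ ?_ m hm
      · refine List.Nodup.map_on ?_ (PySem.List.nodup_pyRange_one _ _)
        intro x _ y _ hxy
        exact mul_right_cancel₀ (by omega : n ≠ 0) hxy
      · intro r hr
        simp only [List.mem_map, PySem.List.mem_pyRange_one] at hr
        obtain ⟨k, ⟨hk2, hkN⟩, rfl⟩ := hr
        have hfd : PySem.Int.floordiv N n = N / n := Int.fdiv_eq_ediv_of_nonneg _ (by omega)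
        rw [hfd] at hkN
        have hkn : k * n ≤ N := (Int.le_ediv_iff_mul_le (by omega)).mp (by omega)
        constructor
        · nlinarith
        · rw [hlen]; omega
    rw [hinner]
    rw [List.filter_cons]
    by_cases hcond : n ∣ m ∧ 2*n ≤ m
    · rw [if_pos ((pvMem_factor_range N n m hn2 hm hmN).mpr hcond), if_pos (by simpa using hcond)]
      simp only [List.sum_append, List.sum_cons, List.sum_nil]
      ring
    · rw [if_neg (fun hc => hcond ((pvMem_factor_range N n m hn2 hm hmN).mp hc)),
        if_neg (by simpa using hcond)]

-- ---- the processing loop establishes the invariant for every entry ----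

theorem pvAFold_spec (N : Int) (fsum : Array Int) (f : Int → Int)
    (hfv : ∀ v : Int, 0 ≤ v → f v = pvAget fsum v 0)
    (hN : 6 ≤ N)
    (Hnn : ∀ v, 0 ≤ v → v ≤ N → 0 ≤ f v)
    (Hpos : ∀ v, 1 ≤ v → v ≤ N → 1 ≤ f v)
    (Hf1 : f 1 = 1) :
    ∀ (cnt : Nat) (b : Int) (T : Array (List Int)), 2 ≤ b → b ≤ N+1 →
      (N+1-b).toNat = cnt →
      T.size = (N+1).toNat →
      pvAget T 1 [] = [1] →
      (∀ m : Int, 2 ≤ m → m < b → pvPhi f N m (pvAget T m [])) →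
      (∀ m : Int, b ≤ m → m ≤ N → pvAget T m [] = []) →
      ∀ m : Int, 2 ≤ m → m ≤ N →
        pvPhi f N m (pvAget
          ((PySem.List.pyRange b (N+1) 1).foldl
            (fun ch x => pvAWhile N x fsum (N+2).toNat ch x (pvAget fsum x 0)) T)
          m []) := by
  intro cnt
  induction cnt with
  | zero =>
    intro b T hb2 hbN hcnt hlen h1 hproc hun m hm2 hmN
    have hb : b = N+1 := by omega
    subst hb
    rw [PySem.List.pyRange_one_eq_nil (le_refl _), List.foldl_nil]
    exact hproc m hm2 (by omega)
  | succ cnt ihc =>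
    intro b T hb2 hbN hcnt hlen h1 hproc hun m hm2 hmN
    have hblt : b < N+1 := by omega
    rw [PySem.List.pyRange_one_cons hblt, List.foldl_cons]
    have hstep := pvAWhile_spec N b fsum f hfv hN hb2 (by omega) Hnn Hpos Hf1 T hlen h1
      (fun m' h2 h3 => hproc m' h2 h3) (fun m' h2 h3 => hun m' h2 h3)
      (N+2).toNat 0 (by simp [pvSeg])
      (fun j hj => by
        have hj0 : j = 0 := Nat.le_zero.mp hj
        subst hj0
        simp only [Function.iterate_zero_apply]
        exact ⟨by omega, by omega⟩)
      (by omega)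
    obtain ⟨c, heq, hphi⟩ := hstep
    have hTb : pvAset T b (pvSeg f b 0) = T := by
      rw [pvSeg_zero]
      exact pvSet_self_eq T [] b (hun b (le_refl b) (by omega)) (by omega) (by rw [hlen]; omega)
    rw [hTb] at heq
    simp only [Function.iterate_zero_apply] at heq
    rw [heq]
    refine ihc (b+1) (pvAset T b c) (by omega) (by omega) (by omega)
      (by rw [pvSize_set]; exact hlen) ?_ ?_ ?_ m hm2 hmN
    · rw [pvGet_set_other T [] b 1 c (by omega) (by omega) (by omega)]
      exact h1
    · intro m' h2 h3
      by_cases hmb : m' = b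
      · subst hmb
        rw [pvGet_set_self T [] m' c (by omega) (by rw [hlen]; omega)]
        exact hphi
      · rw [pvGet_set_other T [] b m' c (by omega) (by omega) hmb]
        exact hproc m' h2 (by omega)
    · intro m' h2 h3
      rw [pvGet_set_other T [] b m' c (by omega) (by omega) (by omega)]
      exact hun m' (by omega) h3


-- ---- the two successor functions of the programs ----

def pvFA (N : Int) : Int → Int := fun v => pvAget (pvAFsum N) v 0
def pvFB (N : Int) : Int → Int := fun v => pvAget (pvBSieve N) v 0

/-- shared divisor sum over the proper divisors ≥ 2. -/
def pvSA (N m : Int) : Int :=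
  ((PySem.List.pyRange 2 (N+1) 1).filter (fun x => decide (x ∣ m ∧ 2*x ≤ m))).sum

theorem pvSA_nonneg (N m : Int) : 0 ≤ pvSA N m := by
  refine List.sum_nonneg ?_
  intro x hx
  have := List.mem_of_mem_filter hx
  rw [PySem.List.mem_pyRange_one] at this
  omega

theorem pvFA_zero (N : Int) (hN : 6 ≤ N) : pvFA N 0 = 0 := by
  rw [pvFA]
  simp only [pvAFsum]
  rw [pvGet_set_other _ 0 1 0 1 (by omega) (by omega) (by omega),
    pvGet_set_self _ 0 0 0 (by omega)]
  simp [PySem.List.length_pyRange_one]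
  omega

theorem pvFA_one (N : Int) (hN : 6 ≤ N) : pvFA N 1 = 1 := by
  rw [pvFA]
  simp only [pvAFsum]
  rw [pvGet_set_self _ 0 1 1 (by omega)]
  rw [pvSize_set]
  simp [PySem.List.length_pyRange_one]
  omega

theorem pvFA_mid (N : Int) (hN : 6 ≤ N) (m : Int) (h2 : 2 ≤ m) (hm : m ≤ N) :
    pvFA N m = 1 + pvSA N m := by
  rw [pvFA]
  simp only [pvAFsum]
  rw [pvGet_set_other _ 0 1 m 1 (by omega) (by omega) (by omega),
    pvGet_set_other _ 0 0 m 0 (by omega) (by omega) (by omega),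
    pvAget_toArray _ _ _ (by omega),
    PySem.List.pyGetD_map_pyRange_of_nonneg _ (N+1) m 0 (by omega) (by omega)]
  have hfold : (pvAget (pvAFactors N) m []).sum
      = (pvAget (pvAset (pvAset
          (((PySem.List.pyRange 0 (N+1) 1).map (fun n => [(1:Int), n])).toArray) 0 []) 1 [1])
          m []).sum
        + pvSA N m := by
    rw [pvAFactors]
    exact pvAFactors_fold N (PySem.List.pyRange 2 (N+1) 1) _
      (fun x hx => by rw [PySem.List.mem_pyRange_one] at hx; omega)
      (by rw [pvSize_set, pvSize_set]
          simp [PySem.List.length_pyRange_one])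
      m (by omega) hm
  rw [hfold]
  rw [pvGet_set_other _ [] 1 m [1] (by omega) (by omega) (by omega),
    pvGet_set_other _ [] 0 m [] (by omega) (by omega) (by omega),
    pvAget_toArray _ _ _ (by omega),
    PySem.List.pyGetD_map_pyRange_of_nonneg _ (N+1) m [] (by omega) (by omega)]
  simp
  ring

theorem pvFB_entry (N : Int) (hN : 6 ≤ N) (m : Int) (h0 : 0 ≤ m) (hm : m ≤ N) :
    pvFB N m = ((PySem.List.pyRange 1 (N+1) 1).filter
      (fun x => decide (x ∣ m ∧ 2*x ≤ m))).sum := by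
  rw [pvFB]
  simp only [pvBSieve]
  rw [if_pos (by omega : (0:Int) ≤ N)]
  rw [pvBSieve_fold N _ _ (fun x hx => by rw [PySem.List.mem_pyRange_one] at hx; omega)
    (by simp) m h0 hm]
  have : pvAget (List.replicate (N+1).toNat (0:Int)).toArray m 0 = 0 := by
    rw [pvAget_toArray _ _ _ h0,
      PySem.List.pyGetD_eq_getElem _ _ h0 (by simp; omega)]
    simp
  rw [this]
  omega

theorem pvFB_zero (N : Int) (hN : 6 ≤ N) : pvFB N 0 = 0 := by
  rw [pvFB_entry N hN 0 (by omega) (by omega)]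
  have : (PySem.List.pyRange 1 (N+1) 1).filter
      (fun x => decide (x ∣ (0:Int) ∧ 2*x ≤ 0)) = [] := by
    rw [List.filter_eq_nil_iff]
    intro x hx
    rw [PySem.List.mem_pyRange_one] at hx
    simp
    omega
  rw [this]
  rfl

theorem pvFB_one (N : Int) (hN : 6 ≤ N) : pvFB N 1 = 0 := by
  rw [pvFB_entry N hN 1 (by omega) (by omega)]
  have : (PySem.List.pyRange 1 (N+1) 1).filter
      (fun x => decide (x ∣ (1:Int) ∧ 2*x ≤ 1)) = [] := by
    rw [List.filter_eq_nil_iff]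
    intro x hx
    rw [PySem.List.mem_pyRange_one] at hx
    simp
    omega
  rw [this]
  rfl

theorem pvFB_mid (N : Int) (hN : 6 ≤ N) (m : Int) (h2 : 2 ≤ m) (hm : m ≤ N) :
    pvFB N m = 1 + pvSA N m := by
  rw [pvFB_entry N hN m (by omega) hm]
  rw [PySem.List.pyRange_one_cons (by omega : (1:Int) < N+1), List.filter_cons]
  rw [if_pos (by simp; omega)]
  rw [List.sum_cons]
  rfl

theorem pvF_agree (N : Int) (hN : 6 ≤ N) :
    ∀ v, 2 ≤ v → v ≤ N → pvFA N v = pvFB N v := by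
  intro v h2 hv
  rw [pvFA_mid N hN v h2 hv, pvFB_mid N hN v h2 hv]

theorem pvFA_nn (N : Int) (hN : 6 ≤ N) : ∀ v, 0 ≤ v → v ≤ N → 0 ≤ pvFA N v := by
  intro v h0 hv
  rcases (by omega : v = 0 ∨ v = 1 ∨ 2 ≤ v) with rfl | rfl | h2
  · rw [pvFA_zero N hN]
  · rw [pvFA_one N hN]; omega
  · rw [pvFA_mid N hN v h2 hv]
    have := pvSA_nonneg N v
    omega

theorem pvFA_pos (N : Int) (hN : 6 ≤ N) : ∀ v, 1 ≤ v → v ≤ N → 1 ≤ pvFA N v := by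
  intro v h1 hv
  rcases (by omega : v = 1 ∨ 2 ≤ v) with rfl | h2
  · rw [pvFA_one N hN]
  · rw [pvFA_mid N hN v h2 hv]
    have := pvSA_nonneg N v
    omega


-- ---- final assembly ----

/-- the canonical candidate list: the cycle path of every cycle start in [2, N]. -/
def pvCands (f : Int → Int) (N : Int) : List (List Int) :=
  ((PySem.List.pyRange 2 (N+1) 1).filter (fun n => decide ((pvRes f N n).2 = n))).map
    (fun n => (pvRes f N n).1)

theorem pvOnCyc_res_struct (f : Int → Int) (N n : Int)
    (h0 : 0 ≤ n) (hn : n ≤ N) (hN : 0 ≤ N)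
    (Hnn : ∀ v, 0 ≤ v → v ≤ N → 0 ≤ f v) (h : pvOnCyc f N n) :
    ∃ j, 1 ≤ j ∧ pvRes f N n = (pvSeg f n j, n) ∧ f^[j] n = n := by
  have hper := pvPeriodic_of_onCyc f N n h0 hn hN Hnn h
  have hex : ∃ i : Nat, 1 ≤ i ∧ f^[i] n = n := by
    obtain ⟨j, hj1, hret, _⟩ := hper
    exact ⟨j, hj1, hret⟩
  classical
  have hspec := Nat.find_spec hex
  refine ⟨Nat.find hex, hspec.1, ?_, hspec.2⟩
  exact pvRes_of_periodic f N n hN hper _ hspec.1 hspec.2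
    (fun i h1 h2 hcon => Nat.find_min hex h2 ⟨h1, hcon⟩)

theorem pvExtract (N : Int) (hN : 6 ≤ N) (f : Int → Int) (fsum : Array Int)
    (chains : Array (List Int))
    (hfv : ∀ v : Int, 0 ≤ v → f v = pvAget fsum v 0)
    (Hnn : ∀ v, 0 ≤ v → v ≤ N → 0 ≤ f v)
    (hphi : ∀ m : Int, 2 ≤ m → m ≤ N → pvPhi f N m (pvAget chains m [])) :
    (PySem.List.pyRange 2 (N+1) 1).foldl
      (fun acc n =>
        if (pvAget chains n []).length = 0 then acc
        else if pvAget fsum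
            (PySem.List.pyGetD (pvAget chains n []) (-1) 0) 0 = n
          then acc ++ [pvAget chains n []] else acc) []
    = pvCands f N := by
  rw [PySem.List.foldl_congr_mem (PySem.List.pyRange 2 (N+1) 1) _
    (fun acc n => if decide ((pvRes f N n).2 = n) = true
      then acc ++ [(pvRes f N n).1] else acc) [] ?_]
  · rw [pvCands]
    have := PySem.List.foldl_append_if (fun n => decide ((pvRes f N n).2 = n))
      (fun n => (pvRes f N n).1) (PySem.List.pyRange 2 (N+1) 1) []
    simpa using this
  · intro acc n hn
    dsimp only
    rw [PySem.List.mem_pyRange_one] at hn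
    have hn2 : 2 ≤ n := hn.1
    have hnN : n ≤ N := by omega
    have hΦ := hphi n hn2 hnN
    by_cases hc : pvAget chains n [] = []
    · rw [if_pos (by rw [hc]; rfl)]
      have hnotc : ¬ (pvRes f N n).2 = n := by
        intro hcyc
        obtain ⟨j, hj, hres, _⟩ := pvOnCyc_res_struct f N n (by omega) hnN (by omega) Hnn hcyc
        have hres1 := hΦ.1 hcyc
        rw [hc, hres] at hres1
        have hlen := congrArg List.length hres1
        rw [List.length_nil] at hlen
        have he : ((pvSeg f n j, n).1) = pvSeg f n j := rfl
        rw [he, length_pvSeg] at hlen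
        omega
      rw [if_neg (by simpa using hnotc)]
    · obtain ⟨hceq, hcb, hclast⟩ := hΦ.2 hc
      set c := pvAget chains n [] with hcdef
      set L := c.length with hLdef
      have hL : 1 ≤ L := by
        rcases c with _ | ⟨a, l⟩
        · exact absurd rfl hc
        · simp [hLdef]
      rw [if_neg (by omega)]
      have hlast : PySem.List.pyGetD c (-1) 0 = f^[L-1] n := by
        rw [PySem.List.pyGetD_neg_one c 0 hc, List.getLast_eq_getElem]
        rw [List.getElem_of_eq hceq]
        exact pvSeg_getElem f n L (L-1) (by omega)
      have hlast_mem : f^[L-1] n ∈ c := by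
        rw [hceq, mem_pvSeg]
        exact ⟨L-1, by omega, rfl⟩
      have hlb := hcb _ hlast_mem
      rw [hlast, ← hfv _ hlb.1]
      by_cases htest : f (f^[L-1] n) = n
      · rw [if_pos htest]
        have hret : f^[L] n = n := by
          conv_lhs => rw [show L = (L-1)+1 by omega]
          rw [Function.iterate_succ_apply']
          exact htest
        have hper : pvPeriodic f N n := by
          refine ⟨L, hL, hret, ?_⟩
          intro i hi
          rcases Nat.lt_or_ge i L with hiL | hiL
          · refine hcb _ ?_
            rw [hceq, mem_pvSeg]
            exact ⟨i, by omega, rfl⟩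
          · have : i = L := by omega
            subst this
            rw [hret]
            exact ⟨by omega, hnN⟩
        have hcyc := pvOnCyc_of_periodic f N n (by omega) hper
        rw [if_pos (by simpa using hcyc)]
        rw [hΦ.1 hcyc]
      · rw [if_neg htest]
        have hnotc : ¬ (pvRes f N n).2 = n := by
          intro hcyc
          obtain ⟨j, hj, hres, hjret⟩ :=
            pvOnCyc_res_struct f N n (by omega) hnN (by omega) Hnn hcyc
          have hcres := hΦ.1 hcyc
          rw [hres] at hcres
          have hLj : L = j := by
            rw [hLdef, hcres, length_pvSeg]
          apply htest
          rw [hLj]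
          have : f (f^[j-1] n) = f^[j] n := by
            conv_rhs => rw [show j = (j-1)+1 by omega, Function.iterate_succ_apply']
          rw [this]
          exact hjret
        rw [if_neg (by simpa using hnotc)]

-- ---- B's selection fold is first-longest, i.e. Python's max(..., key=len) ----

theorem pvBWalk_eq (N : Int) (fs : Array Int) :
    ∀ (fuel : Nat) (p : List Int) (v : Int),
      pvBWalk N fs fuel p v = pvWlk (fun u => pvAget fs u 0) N fuel p v := by
  intro fuel
  induction fuel with
  | zero => intro p v; rfl
  | succ fuel ih =>
    intro p v
    rw [pvBWalk, pvWlk]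
    by_cases hg : v ≤ N ∧ v ∉ p
    · rw [if_pos hg, if_pos hg, ih]
    · rw [if_neg hg, if_neg hg]

theorem pvMax?_append (l : List (List Int)) (c : List Int) :
    PySem.List.max? (l ++ [c]) (fun x => x.length)
      = match PySem.List.max? l (fun x => x.length) with
        | none => some c
        | some b => if b.length < c.length then some c else some b := by
  rw [PySem.List.max?, PySem.List.max?, List.foldl_append, List.foldl_cons, List.foldl_nil]
  generalize (List.foldl _ none l : Option (List Int)) = M
  cases M with
  | none => rfl
  | some b => rfl

theorem pvBSel (N : Int) (fs : Array Int) :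
    ∀ (rng : List Int),
      rng.foldl (fun best n =>
        let pr := pvBWalk N fs (N+2).toNat [] n
        match best with
        | none => if pr.2 = n then some pr.1 else none
        | some b => if pr.2 = n ∧ b.length < pr.1.length then some pr.1 else some b) none
      = PySem.List.max?
          ((rng.filter (fun n =>
            decide ((pvRes (fun u => pvAget fs u 0) N n).2 = n))).map
            (fun n => (pvRes (fun u => pvAget fs u 0) N n).1))
          (fun c => c.length) := by
  intro rng
  induction rng using List.reverseRecOn with
  | nil => rfl
  | append_singleton l x ih =>
    rw [List.foldl_append, List.foldl_cons, List.foldl_nil, ih]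
    rw [List.filter_append, List.map_append]
    have hwalk : pvBWalk N fs (N+2).toNat [] x
        = pvRes (fun u => pvAget fs u 0) N x := pvBWalk_eq N fs _ [] x
    by_cases hx : (pvRes (fun u => pvAget fs u 0) N x).2 = x
    · rw [List.filter_cons_of_pos (by simpa using hx), List.filter_nil,
        List.map_cons, List.map_nil, pvMax?_append]
      simp only [hwalk]
      generalize (PySem.List.max?
        ((l.filter (fun n =>
          decide ((pvRes (fun u => pvAget fs u 0) N n).2 = n))).map
          (fun n => (pvRes (fun u => pvAget fs u 0) N n).1))
        (fun c => c.length)) = M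
      cases M with
      | none => simp [hx]
      | some b =>
        by_cases hlen : b.length < (pvRes (fun u => pvAget fs u 0) N x).1.length
        · simp [hx, hlen]
        · simp [hx, hlen]
    · rw [List.filter_cons_of_neg (by simpa using hx), List.filter_nil,
        List.map_nil, List.append_nil]
      simp only [hwalk]
      generalize (PySem.List.max?
        ((l.filter (fun n =>
          decide ((pvRes (fun u => pvAget fs u 0) N n).2 = n))).map
          (fun n => (pvRes (fun u => pvAget fs u 0) N n).1))
        (fun c => c.length)) = M
      cases M with
      | none => simp [hx]
      | some b => simp [hx]

-- ---- the two candidate lists coincide ----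

theorem pvCands_eq (N : Int) (hN : 6 ≤ N) : pvCands (pvFA N) N = pvCands (pvFB N) N := by
  have hbr : ∀ n : Int, 2 ≤ n →
      pvRes (pvFA N) N n = pvRes (pvFB N) N n ∨
      ((pvRes (pvFA N) N n).2 ≤ 1 ∧ (pvRes (pvFB N) N n).2 ≤ 1) := by
    intro n h2
    exact pvBridge_run (pvFA N) (pvFB N) N (pvFA_zero N hN) (pvFA_one N hN)
      (pvFB_zero N hN) (pvFB_one N hN) (pvF_agree N hN) (pvFA_nn N hN)
      (N+2).toNat [] n (by simp) (by simp) h2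
  rw [pvCands, pvCands]
  have hfilter : (PySem.List.pyRange 2 (N+1) 1).filter
        (fun n => decide ((pvRes (pvFA N) N n).2 = n))
      = (PySem.List.pyRange 2 (N+1) 1).filter
        (fun n => decide ((pvRes (pvFB N) N n).2 = n)) := by
    refine List.filter_congr ?_
    intro n hn
    rw [PySem.List.mem_pyRange_one] at hn
    rcases hbr n hn.1 with heq | hlow
    · rw [heq]
    · have h1 : ¬ (pvRes (pvFA N) N n).2 = n := by omega
      have h2 : ¬ (pvRes (pvFB N) N n).2 = n := by omega
      simp [h1, h2]
  rw [hfilter]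
  refine List.map_congr_left ?_
  intro n hn
  rw [List.mem_filter] at hn
  have hmem := hn.1
  rw [PySem.List.mem_pyRange_one] at hmem
  have hcyc : (pvRes (pvFB N) N n).2 = n := by simpa using hn.2
  rcases hbr n hmem.1 with heq | hlow
  · rw [heq]
  · omega

-- ===== VERDICT (by name: the statement is the Claim_ definition above) =====
theorem brute_force_more_efficient_spec : Claim_equal_brute_force_more_efficient := by
  intro N _ hpre
  have hN : 6 ≤ N := hpre
  unfold Spec_brute_force_more_efficient
  -- initial chains table
  have hlen1 : ((pvAset (pvAset
      (((PySem.List.pyRange 0 (N+1) 1).map (fun _ => ([] : List Int))).toArray) 0 [0]) 1 [1])).size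
      = (N+1).toNat := by
    rw [pvSize_set, pvSize_set, List.size_toArray, List.length_map,
      PySem.List.length_pyRange_one]
    omega
  have hchains : pvAChains N (pvAFsum N)
      = (PySem.List.pyRange 2 (N+1) 1).foldl
          (fun ch x => pvAWhile N x (pvAFsum N) (N+2).toNat ch x
            (pvAget (pvAFsum N) x 0))
          (pvAset (pvAset
            (((PySem.List.pyRange 0 (N+1) 1).map (fun _ => ([] : List Int))).toArray)
            0 [0]) 1 [1]) := rfl
  have hphi : ∀ m : Int, 2 ≤ m → m ≤ N →
      pvPhi (pvFA N) N m (pvAget (pvAChains N (pvAFsum N)) m []) := by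
    intro m hm2 hmN
    rw [hchains]
    refine pvAFold_spec N (pvAFsum N) (pvFA N) (fun v _ => rfl) hN (pvFA_nn N hN)
      (pvFA_pos N hN) (pvFA_one N hN) (N-1).toNat 2 _ (by omega) (by omega) (by omega)
      hlen1 ?_ ?_ ?_ m hm2 hmN
    · rw [pvGet_set_self _ [] 1 [1] (by omega) ?_]
      rw [pvSize_set, List.size_toArray, List.length_map, PySem.List.length_pyRange_one]
      omega
    · intro m' h2 h3
      omega
    · intro m' h2 h3
      rw [pvGet_set_other _ [] 1 m' [1] (by omega) (by omega) (by omega),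
        pvGet_set_other _ [] 0 m' [0] (by omega) (by omega) (by omega),
        pvAget_toArray _ _ _ (by omega),
        PySem.List.pyGetD_map_pyRange_of_nonneg _ (N+1) m' [] (by omega) (by omega)]
  have hAeq : brute_force_more_efficient N
      = (PySem.List.max? ((PySem.List.pyRange 2 (N+1) 1).foldl
          (fun acc n =>
            if (pvAget (pvAChains N (pvAFsum N)) n []).length = 0 then acc
            else if pvAget (pvAFsum N)
                (PySem.List.pyGetD (pvAget (pvAChains N (pvAFsum N)) n []) (-1) 0) 0
                = n
              then acc ++ [pvAget (pvAChains N (pvAFsum N)) n []] else acc) [])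
          (fun c => c.length)).getD [] := rfl
  have hBeq : brute_force_more_efficient_alt N
      = ((PySem.List.pyRange 2 (N+1) 1).foldl
          (fun best n =>
            let pr := pvBWalk N (pvBSieve N) (N+2).toNat [] n
            match best with
            | none => if pr.2 = n then some pr.1 else none
            | some b => if pr.2 = n ∧ b.length < pr.1.length then some pr.1 else some b)
          none).getD [] := rfl
  rw [hAeq, hBeq]
  rw [pvExtract N hN (pvFA N) (pvAFsum N) (pvAChains N (pvAFsum N)) (fun v _ => rfl)
    (pvFA_nn N hN) hphi]
  rw [pvBSel N (pvBSieve N)]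
  have hfb : ((PySem.List.pyRange 2 (N+1) 1).filter (fun n =>
      decide ((pvRes (fun u => pvAget (pvBSieve N) u 0) N n).2 = n))).map
      (fun n => (pvRes (fun u => pvAget (pvBSieve N) u 0) N n).1)
      = pvCands (pvFB N) N := rfl
  rw [hfb, ← pvCands_eq N hN]
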